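-- pv_equiv track=rewrite | github.com/cameron-simpson/css | lib/python/cs/lex.py | as_lines
-- ===== SOURCE A (Python) =====
-- def as_lines(chunks, partials=None):
--   ''' Generator yielding complete lines from arbitrary pieces of text from
--       the iterable of `str` `chunks`.
--
--       After completion, any remaining newline-free chunks remain
--       in the partials list; they will be unavailable to the caller
--       unless the list is presupplied.
--   '''
--   if partials is None:
--     partials = []
--   if any('\n' in p for p in partials):
--     raise ValueError("newline in partials: %r" % (partials,))
--   for chunk in chunks:
--     pos = 0
--     nl_pos = chunk.find('\n', pos)
--     while nl_pos >= pos: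
--       partials.append(chunk[pos:nl_pos + 1])
--       yield ''.join(partials)
--       partials[:] = ()
--       pos = nl_pos + 1
--       nl_pos = chunk.find('\n', pos)
--     if pos < len(chunk):
--       partials.append(chunk[pos:])
-- ===== SOURCE B (Python) =====
-- def as_lines(chunks, partials=None):
--   ''' Generator yielding complete lines from pieces of text in `chunks`.
--
--       Split-based re-implementation: each chunk is split on newline once;
--       every segment but the last completes a line, the last becomes the
--       new partial.
--   '''
--   if partials is None:
--     partials = []
--   if any('\n' in p for p in partials):
--     raise ValueError("newline in partials: %r" % (partials,))
--   for chunk in chunks: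
--     segments = chunk.split('\n')
--     for segment in segments[:-1]:
--       partials.append(segment + '\n')
--       yield ''.join(partials)
--       partials[:] = ()
--     if segments[-1]:
--       partials.append(segments[-1])
-- ===== Notes on version B (the rewrite author's own statement) =====
-- stated objective: idiomatic
-- what changed: Replaces the inner while-loop over find('\n', pos) and manual index slicing with a single chunk.split('\n') per chunk, yielding one completed line per non-final segment and keeping the non-empty final segment as the new partial.
import Mathlib
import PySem

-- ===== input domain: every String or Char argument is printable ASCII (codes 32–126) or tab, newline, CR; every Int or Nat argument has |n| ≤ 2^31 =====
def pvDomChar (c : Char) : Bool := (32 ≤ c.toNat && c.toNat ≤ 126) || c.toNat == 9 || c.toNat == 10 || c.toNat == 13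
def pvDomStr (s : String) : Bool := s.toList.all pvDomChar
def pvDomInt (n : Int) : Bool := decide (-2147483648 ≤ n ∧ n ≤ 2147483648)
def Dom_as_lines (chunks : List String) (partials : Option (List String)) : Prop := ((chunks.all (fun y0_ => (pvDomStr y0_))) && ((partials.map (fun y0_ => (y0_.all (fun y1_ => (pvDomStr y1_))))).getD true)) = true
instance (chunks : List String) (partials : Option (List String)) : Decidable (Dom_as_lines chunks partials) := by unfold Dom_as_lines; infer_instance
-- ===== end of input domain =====

-- B replaces A's inner find('\n', pos) while-loop by one split('\n') per chunk (idiomatic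
-- decomposition, same cost). Both A and B mutate the caller's `partials` list identically;
-- the equivalence proved here is about the sequence of yielded lines (the return value).


-- ===== PORT A =====
-- A's inner while-loop: pos scans the chunk with chunk.find('\n', pos); the loop advances
-- pos by at least 1 each turn, so fuel = chunk.length + 1 never runs out.
def asLinesLoopA (cs : List Char) (fuel : Nat) (pos : Nat)
    (out parts : List (List Char)) : List (List Char) × List (List Char) :=
  match fuel with
  | 0 => (out, parts)
  | fuel + 1 =>
    let nl := PySem.Chars.findFrom cs ['\n'] (pos : Int) none
    if (pos : Int) ≤ nl then
      let parts' := parts ++ [PySem.Chars.slice cs (some (pos : Int)) (some (nl + 1))]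
      asLinesLoopA cs fuel (nl.toNat + 1) (out ++ [PySem.Chars.join [] parts']) []
    else
      if pos < cs.length then (out, parts ++ [PySem.Chars.slice cs (some (pos : Int)) none])
      else (out, parts)

def as_lines (chunks : List String) (partials : Option (List String)) : List String :=
  let parts0 := (partials.getD []).map String.toList
  -- Python raises ValueError here; those inputs are excluded by Pre_as_lines
  if parts0.any (fun p => PySem.Chars.isIn ['\n'] p) then []
  else
    (chunks.foldl
      (fun st chunk => asLinesLoopA chunk.toList (chunk.toList.length + 1) 0 st.1 st.2)
      (([] : List (List Char)), parts0)).1.map String.ofList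

-- ===== PORT B =====
-- B's per-chunk step: segments = chunk.split('\n'); every segment but the last completes
-- a line, a non-empty last segment becomes the new partial.
def asLinesChunkB (cs : List Char) (out parts : List (List Char)) :
    List (List Char) × List (List Char) :=
  let segs := PySem.Chars.splitOn cs ['\n']
  let st := segs.dropLast.foldl
    (fun st seg => (st.1 ++ [PySem.Chars.join [] (st.2 ++ [seg ++ ['\n']])],
                    ([] : List (List Char))))
    (out, parts)
  let last := (PySem.List.pyGet? segs (-1)).getD []   -- segments[-1]; segs is never empty
  if last = [] then st else (st.1, st.2 ++ [last])

def as_lines_alt (chunks : List String) (partials : Option (List String)) : List String :=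
  let parts0 := (partials.getD []).map String.toList
  -- Python raises ValueError here; those inputs are excluded by Pre_as_lines
  if parts0.any (fun p => PySem.Chars.isIn ['\n'] p) then []
  else
    (chunks.foldl (fun st chunk => asLinesChunkB chunk.toList st.1 st.2)
      (([] : List (List Char)), parts0)).1.map String.ofList

-- ===== PRECONDITION & SPEC =====
-- Pre_ excludes exactly the inputs where A raises ValueError: a presupplied partial
-- containing a newline (B raises the same ValueError there).
def Pre_as_lines (chunks : List String) (partials : Option (List String)) : Prop :=
  ((partials.getD []).all (fun p => !PySem.Str.isIn "\n" p)) = true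
instance (chunks : List String) (partials : Option (List String)) : Decidable (Pre_as_lines chunks partials) := by unfold Pre_as_lines; infer_instance

def pvWitness_as_lines : List String × Option (List String) := (["ab\ncd", "e\n"], some ["x"])

def Spec_as_lines (chunks : List String) (partials : Option (List String)) (out : List String) : Prop := out = as_lines_alt chunks partials
instance (chunks : List String) (partials : Option (List String)) (out : List String) : Decidable (Spec_as_lines chunks partials out) := by unfold Spec_as_lines; infer_instance

-- ===== CLAIM (what is proved, stated in full; the proofs are below) =====
def Claim_equal_as_lines : Prop := ∀ (chunks : List String) (partials : Option (List String)), Dom_as_lines chunks partials → Pre_as_lines chunks partials → Spec_as_lines chunks partials (as_lines chunks partials)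

-- ===== LEMMAS AND PROOFS =====

-- splitOn.go accumulator lemma
theorem splitOnGo_acc (sep : List Char) (fuel : Nat) (l cur : List Char)
    (acc : List (List Char)) :
    PySem.Chars.splitOn.go sep fuel l cur acc
      = acc.reverse ++ PySem.Chars.splitOn.go sep fuel l cur [] := by
  induction fuel generalizing l cur acc with
  | zero => cases l <;> simp [PySem.Chars.splitOn.go]
  | succ fuel ih =>
    cases l with
    | nil => simp [PySem.Chars.splitOn.go]
    | cons c rest =>
      simp only [PySem.Chars.splitOn.go]
      split
      · rw [ih _ _ (cur.reverse :: acc), ih _ _ [cur.reverse]]; simp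
      · exact ih _ _ _

theorem splitOnGo_ne_nil (sep : List Char) (fuel : Nat) (l cur : List Char) :
    PySem.Chars.splitOn.go sep fuel l cur [] ≠ [] := by
  induction fuel generalizing l cur with
  | zero => cases l <;> simp [PySem.Chars.splitOn.go]
  | succ fuel ih =>
    cases l with
    | nil => simp [PySem.Chars.splitOn.go]
    | cons c rest =>
      simp only [PySem.Chars.splitOn.go]
      split
      · rw [splitOnGo_acc]; simp
      · exact ih _ _

theorem splitOnGo_no_nl (l : List Char) (h : '\n' ∉ l) :
    ∀ fuel, l.length ≤ fuel → ∀ cur acc,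
      PySem.Chars.splitOn.go ['\n'] fuel l cur acc = ((cur.reverse ++ l) :: acc).reverse := by
  induction l with
  | nil => intro fuel _ cur acc; cases fuel <;> simp [PySem.Chars.splitOn.go]
  | cons c rest ih =>
    intro fuel hf cur acc
    match fuel, hf with
    | fuel + 1, hf =>
      have hc : c ≠ '\n' := by simp at h; tauto
      have hp : List.isPrefixOf ['\n'] (c :: rest) = false := by
        simp [List.isPrefixOf]; exact fun hx => absurd hx.symm hc
      simp only [PySem.Chars.splitOn.go, hp]
      rw [ih (by simp at h; tauto) fuel (by simpa using Nat.le_of_succ_le_succ hf) (c :: cur) acc]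
      simp

theorem splitOn_no_nl (l : List Char) (h : '\n' ∉ l) :
    PySem.Chars.splitOn l ['\n'] = [l] := by
  unfold PySem.Chars.splitOn
  rw [splitOnGo_no_nl l h (l.length + 1) (by omega) [] []]
  simp

theorem splitOnGo_nl (a : List Char) (h : '\n' ∉ a) :
    ∀ (b cur : List Char) (acc : List (List Char)) (fuel : Nat),
      PySem.Chars.splitOn.go ['\n'] (fuel + (a.length + 1)) (a ++ '\n' :: b) cur acc
        = PySem.Chars.splitOn.go ['\n'] fuel b [] ((cur.reverse ++ a) :: acc) := by
  induction a with
  | nil =>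
    intro b cur acc fuel
    have hp : List.isPrefixOf ['\n'] ('\n' :: b) = true := by simp [List.isPrefixOf]
    simp only [List.nil_append]
    simp only [PySem.Chars.splitOn.go, hp]
    simp
  | cons c rest ih =>
    intro b cur acc fuel
    have hc : c ≠ '\n' := by simp at h; tauto
    have hp : List.isPrefixOf ['\n'] (c :: (rest ++ '\n' :: b)) = false := by
      simp [List.isPrefixOf]; exact fun hx => absurd hx.symm hc
    have harith : fuel + ((c :: rest).length + 1) = (fuel + (rest.length + 1)) + 1 := by
      simp; omega
    rw [harith]
    simp only [List.cons_append, PySem.Chars.splitOn.go, hp]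
    rw [ih (by simp at h; tauto) b (c :: cur) acc fuel]
    simp

theorem splitOn_nl (a b : List Char) (h : '\n' ∉ a) :
    PySem.Chars.splitOn (a ++ '\n' :: b) ['\n'] = a :: PySem.Chars.splitOn b ['\n'] := by
  unfold PySem.Chars.splitOn
  have hl : (a ++ '\n' :: b).length + 1 = (b.length + 1) + (a.length + 1) := by simp; omega
  rw [hl, splitOnGo_nl a h b [] [] (b.length + 1)]
  rw [splitOnGo_acc]
  simp

-- find on the character level
theorem findGo_no_nl (l : List Char) (h : '\n' ∉ l) (k : Nat) :
    PySem.Chars.find.go ['\n'] l k = -1 := by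
  induction l generalizing k with
  | nil => simp [PySem.Chars.find.go]
  | cons c rest ih =>
    have hc : c ≠ '\n' := by simp at h; tauto
    have hp : List.isPrefixOf ['\n'] (c :: rest) = false := by
      simp [List.isPrefixOf]; exact fun hx => absurd hx.symm hc
    simp only [PySem.Chars.find.go, hp]
    exact ih (by simp at h; tauto) (k + 1)

theorem findGo_nl (a : List Char) (h : '\n' ∉ a) :
    ∀ (b : List Char) (k : Nat),
      PySem.Chars.find.go ['\n'] (a ++ '\n' :: b) k = (k : Int) + a.length := by
  induction a with
  | nil =>
    intro b k
    have hp : List.isPrefixOf ['\n'] ('\n' :: b) = true := by simp [List.isPrefixOf]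
    simp [PySem.Chars.find.go, hp]
  | cons c rest ih =>
    intro b k
    have hc : c ≠ '\n' := by simp at h; tauto
    have hp : List.isPrefixOf ['\n'] (c :: (rest ++ '\n' :: b)) = false := by
      simp [List.isPrefixOf]; exact fun hx => absurd hx.symm hc
    simp only [List.cons_append, PySem.Chars.find.go, hp]
    rw [ih (by simp at h; tauto) b (k + 1)]
    simp only [List.length_cons]
    push_cast; ring

theorem find_no_nl (l : List Char) (h : '\n' ∉ l) :
    PySem.Chars.find l ['\n'] = -1 := findGo_no_nl l h 0

theorem find_nl (a b : List Char) (h : '\n' ∉ a) :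
    PySem.Chars.find (a ++ '\n' :: b) ['\n'] = (a.length : Int) := by
  unfold PySem.Chars.find
  rw [findGo_nl a h b 0]; simp

-- segments[-1] of a non-empty list
theorem pyGet?_neg_one {α : Type} (xs : List α) :
    PySem.List.pyGet? xs (-1) = xs.getLast? := by
  cases xs with
  | nil => simp [PySem.List.pyGet?, PySem.List.pyIdx?]
  | cons x rest =>
    simp [PySem.List.pyGet?, PySem.List.pyIdx?, List.getLast?_eq_getElem?]

-- first-occurrence decomposition
theorem mem_split_first {α : Type} [DecidableEq α] (c : α) (t : List α) (h : c ∈ t) :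
    ∃ a b, t = a ++ c :: b ∧ c ∉ a := by
  induction t with
  | nil => simp at h
  | cons x rest ih =>
    by_cases hx : x = c
    · exact ⟨[], rest, by simp [hx], by simp⟩
    · have hm : c ∈ rest := by cases h with
        | head => exact absurd rfl hx
        | tail _ h => exact h
      obtain ⟨a, b, hab, hna⟩ := ih hm
      exact ⟨x :: a, b, by simp [hab], by simp [hna]; exact fun e => hx e.symm⟩

-- B's per-chunk step, characterised
theorem chunkB_no_nl (t : List Char) (h : '\n' ∉ t) (out parts : List (List Char)) :
    asLinesChunkB t out parts = if t = [] then (out, parts) else (out, parts ++ [t]) := by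
  unfold asLinesChunkB
  rw [splitOn_no_nl t h]
  simp [pyGet?_neg_one]

theorem splitOn_ne_nil (s sep : List Char) : PySem.Chars.splitOn s sep ≠ [] := by
  unfold PySem.Chars.splitOn
  exact splitOnGo_ne_nil _ _ _ _

theorem chunkB_nl (a b : List Char) (h : '\n' ∉ a) (out parts : List (List Char)) :
    asLinesChunkB (a ++ '\n' :: b) out parts
      = asLinesChunkB b (out ++ [PySem.Chars.join [] (parts ++ [a ++ ['\n']])]) [] := by
  unfold asLinesChunkB
  rw [splitOn_nl a b h]
  have hne : PySem.Chars.splitOn b ['\n'] ≠ [] := splitOn_ne_nil b ['\n']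
  obtain ⟨s0, S', hS⟩ : ∃ s0 S', PySem.Chars.splitOn b ['\n'] = s0 :: S' := by
    cases hC : PySem.Chars.splitOn b ['\n'] with
    | nil => exact absurd hC hne
    | cons x xs => exact ⟨x, xs, rfl⟩
  rw [hS]
  simp [pyGet?_neg_one, List.getLast?_cons_cons]

-- A's loop equals B's per-chunk step on the remaining suffix
theorem loopA_eq_chunkB (cs : List Char) :
    ∀ (fuel pos : Nat) (out parts : List (List Char)),
      pos ≤ cs.length → cs.length - pos < fuel →
      asLinesLoopA cs fuel pos out parts = asLinesChunkB (cs.drop pos) out parts := by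
  intro fuel
  induction fuel with
  | zero => intro pos out parts _ hf; omega
  | succ fuel ih =>
    intro pos out parts hpos _
    by_cases hmem : '\n' ∈ cs.drop pos
    · obtain ⟨a, b, hab, hna⟩ := mem_split_first '\n' (cs.drop pos) hmem
      have hfind : PySem.Chars.find (cs.drop pos) ['\n'] = (a.length : Int) := by
        rw [hab]; exact find_nl a b hna
      have hff : PySem.Chars.findFrom cs ['\n'] (pos : Int) none = (pos : Int) + a.length := by
        rw [PySem.Chars.findFrom_natCast cs ['\n'] pos hpos, hfind]
        simp
      have hlen : cs.length = pos + (a.length + 1 + b.length) := by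
        have h2 := congrArg List.length hab
        simp at h2
        omega
      simp only [asLinesLoopA, hff]
      rw [if_pos (show ((pos : Int) ≤ (pos : Int) + (a.length : Int)) by omega)]
      have hslice : PySem.Chars.slice cs (some (pos : Int))
          (some ((pos : Int) + (a.length : Int) + 1)) = a ++ ['\n'] := by
        have h1 : (pos : Int) + (a.length : Int) + 1 = (pos : Int) + ((a.length + 1 : Nat) : Int) := by
          push_cast; ring
        rw [PySem.Chars.slice_eq_listSlice, h1, PySem.List.slice_natCast_add, hab]
        have h4 : a ++ '\n' :: b = (a ++ ['\n']) ++ b := by simp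
        have h5 : a.length + 1 = (a ++ ['\n']).length := by simp
        rw [h4, h5]
        exact List.take_left
      have htn : ((pos : Int) + (a.length : Int)).toNat + 1 = pos + a.length + 1 := by omega
      rw [hslice, htn]
      rw [ih (pos + a.length + 1) _ _ (by omega) (by omega)]
      have hdrop : cs.drop (pos + a.length + 1) = b := by
        have h3 : cs.drop (pos + a.length + 1) = (cs.drop pos).drop (a.length + 1) := by
          rw [List.drop_drop, Nat.add_assoc]
        have h4 : a ++ '\n' :: b = (a ++ ['\n']) ++ b := by simp
        have h5 : a.length + 1 = (a ++ ['\n']).length := by simp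
        rw [h3, hab, h4, h5]
        exact List.drop_left
      rw [hdrop, hab, chunkB_nl a b hna]
    · have hfind : PySem.Chars.find (cs.drop pos) ['\n'] = -1 := find_no_nl _ hmem
      have hff : PySem.Chars.findFrom cs ['\n'] (pos : Int) none = -1 := by
        rw [PySem.Chars.findFrom_natCast cs ['\n'] pos hpos, hfind]; simp
      simp only [asLinesLoopA, hff]
      rw [if_neg (by omega)]
      rw [chunkB_no_nl _ hmem]
      by_cases hlt : pos < cs.length
      · rw [if_pos hlt, if_neg (show ¬ cs.drop pos = [] by
          rw [List.drop_eq_nil_iff]; omega)]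
        rw [PySem.Chars.slice_eq_listSlice, PySem.List.slice_from_natCast]
      · rw [if_neg hlt, if_pos (show cs.drop pos = [] by
          rw [List.drop_eq_nil_iff]; omega)]

theorem foldl_ext {α β : Type} (f g : α → β → α) (h : ∀ st x, f st x = g st x) :
    ∀ (l : List β) (s : α), l.foldl f s = l.foldl g s := by
  intro l
  induction l with
  | nil => intro s; rfl
  | cons x rest ih => intro s; simp only [List.foldl_cons, h]; exact ih _

-- ===== VERDICT (by name: the statement is the Claim_ definition above) =====
theorem as_lines_spec : Claim_equal_as_lines := by
  intro chunks partials _ _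
  unfold Spec_as_lines as_lines as_lines_alt
  have h := foldl_ext
    (fun (st : List (List Char) × List (List Char)) chunk =>
      asLinesLoopA chunk.toList (chunk.toList.length + 1) 0 st.1 st.2)
    (fun st chunk => asLinesChunkB chunk.toList st.1 st.2)
    (fun st chunk => by
      simpa using loopA_eq_chunkB chunk.toList (chunk.toList.length + 1) 0 st.1 st.2
        (Nat.zero_le _) (by omega))
    chunks
  simp only [h]
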